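-- pv_equiv track=rewrite | github.com/AnuragIndora/Thesis-Work-Code | Codes/gcnn_py.py | create_facial_landmark_edges
-- ===== SOURCE A (Python) =====
-- def create_facial_landmark_edges(num_landmarks):
--     """
--     Create predefined connections between facial landmarks based on anatomical structure,
--     adapting to the actual number of landmarks detected.
--     Returns a list of tuples representing connected landmarks.
--     """
--     edges = []
--
--     # If we have fewer than expected landmarks, adjust our connections
--     if num_landmarks < 68:
--         # Create a simple connectivity pattern: connect each landmark to its neighbors
--         # This is a fallback when we don't have the standard 68 landmarks
--         for i in range(num_landmarks - 1):
--             edges.append((i, i+1))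
--
--         # Add some cross connections for better graph connectivity
--         step = max(1, num_landmarks // 10)  # Connect roughly every 10% of points
--         for i in range(0, num_landmarks - step, step):
--             edges.append((i, i + step))
--
--         # Add some long-range connections
--         if num_landmarks > 10:
--             for i in range(0, num_landmarks // 2):
--                 edges.append((i, num_landmarks - i - 1))
--
--         return edges
--
--     # Standard 68-point facial landmark connections
--     # Connect jaw points
--     for i in range(16):
--         edges.append((i, i+1))
--
--     # Connect eyebrows
--     for i in range(17, 21):
--         edges.append((i, i+1))
--     for i in range(22, 26):
--         edges.append((i, i+1))
--
--     # Connect nose bridge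
--     for i in range(27, 30):
--         edges.append((i, i+1))
--
--     # Connect nose tip
--     for i in range(31, 35):
--         edges.append((i, i+1))
--     edges.append((35, 31))
--
--     # Connect eyes
--     for i in range(36, 41):
--         edges.append((i, i+1))
--     edges.append((41, 36))
--
--     for i in range(42, 47):
--         edges.append((i, i+1))
--     edges.append((47, 42))
--
--     # Connect outer lips
--     for i in range(48, 59):
--         edges.append((i, i+1))
--     edges.append((59, 48))
--
--     # Connect inner lips
--     for i in range(60, 67):
--         edges.append((i, i+1))
--     edges.append((67, 60))
--
--     # Connect between regions (examples)
--     # Eyes to eyebrows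
--     edges.append((19, 37))  # Right eyebrow to right eye
--     edges.append((24, 44))  # Left eyebrow to left eye
--
--     # Nose to eyes
--     edges.append((30, 39))  # Nose bridge to right eye
--     edges.append((30, 42))  # Nose bridge to left eye
--
--     # Mouth to nose
--     edges.append((33, 51))  # Nose tip to top lip
--     edges.append((33, 57))  # Nose tip to bottom lip
--
--     return edges
-- ===== SOURCE B (Python) =====
-- # Successor-map formulation: one pass over all 68 indices, each index emits its
-- # successor edge (chain-closing edges keyed by a dict, skipped indices in a set),
-- # then the fixed cross-region edges; fallback branch as comprehensions.
-- _CLOSE = {35: 31, 41: 36, 47: 42, 59: 48, 67: 60}  # closed-chain ends -> chain start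
-- _SKIP = {16, 21, 26, 30}                            # open-chain ends: no outgoing edge
-- _EXTRAS = [(19, 37), (24, 44), (30, 39), (30, 42), (33, 51), (33, 57)]
--
-- def create_facial_landmark_edges(num_landmarks):
--     if num_landmarks < 68:
--         edges = [(i, i + 1) for i in range(num_landmarks - 1)]
--         step = max(1, num_landmarks // 10)
--         edges += [(i, i + step) for i in range(0, num_landmarks - step, step)]
--         if num_landmarks > 10:
--             edges += [(i, num_landmarks - i - 1) for i in range(num_landmarks // 2)]
--         return edges
--     edges = []
--     for i in range(68):
--         if i in _CLOSE:
--             edges.append((i, _CLOSE[i]))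
--         elif i not in _SKIP:
--             edges.append((i, i + 1))
--     return edges + _EXTRAS
-- ===== Notes on version B (the rewrite author's own statement) =====
-- stated objective: simpler
-- what changed: The standard-landmark branch's nine per-region loops with hand-placed closing/extra appends are replaced by one pass over the full index range that emits each index's successor edge from a closing-edge dict and a skip set, followed by the fixed cross-region edges; the fallback branch becomes comprehensions.
import Mathlib
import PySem

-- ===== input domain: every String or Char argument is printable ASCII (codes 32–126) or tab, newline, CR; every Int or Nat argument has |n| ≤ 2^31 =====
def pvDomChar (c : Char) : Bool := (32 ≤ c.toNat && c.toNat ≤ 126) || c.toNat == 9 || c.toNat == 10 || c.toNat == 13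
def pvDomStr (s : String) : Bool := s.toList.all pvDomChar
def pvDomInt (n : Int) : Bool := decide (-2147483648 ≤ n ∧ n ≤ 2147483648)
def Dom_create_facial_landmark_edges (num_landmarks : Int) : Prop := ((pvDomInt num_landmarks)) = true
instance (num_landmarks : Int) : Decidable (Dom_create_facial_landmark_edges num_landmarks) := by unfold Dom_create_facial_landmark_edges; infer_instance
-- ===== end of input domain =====

-- B replaces the nine per-region loops with a single pass over the full index range driven by a
-- successor map (closing-edge dict + skip set), then the extra edges (objective: simpler).

-- ===== PORT A =====
def create_facial_landmark_edges (num_landmarks : Int) : List (Int × Int) :=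
  if num_landmarks < 68 then
    let edges : List (Int × Int) := []
    let edges := (PySem.List.pyRange 0 (num_landmarks - 1) 1).foldl
      (fun acc i => acc ++ [(i, i + 1)]) edges
    let step := max 1 (PySem.Int.floordiv num_landmarks 10)
    let edges := (PySem.List.pyRange 0 (num_landmarks - step) step).foldl
      (fun acc i => acc ++ [(i, i + step)]) edges
    let edges := if num_landmarks > 10 then
        (PySem.List.pyRange 0 (PySem.Int.floordiv num_landmarks 2) 1).foldl
          (fun acc i => acc ++ [(i, num_landmarks - i - 1)]) edges
      else edges
    edges
  else
    let edges : List (Int × Int) := []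
    let edges := (PySem.List.pyRange 0 16 1).foldl (fun acc i => acc ++ [(i, i + 1)]) edges
    let edges := (PySem.List.pyRange 17 21 1).foldl (fun acc i => acc ++ [(i, i + 1)]) edges
    let edges := (PySem.List.pyRange 22 26 1).foldl (fun acc i => acc ++ [(i, i + 1)]) edges
    let edges := (PySem.List.pyRange 27 30 1).foldl (fun acc i => acc ++ [(i, i + 1)]) edges
    let edges := (PySem.List.pyRange 31 35 1).foldl (fun acc i => acc ++ [(i, i + 1)]) edges
    let edges := edges ++ [((35 : Int), (31 : Int))]
    let edges := (PySem.List.pyRange 36 41 1).foldl (fun acc i => acc ++ [(i, i + 1)]) edges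
    let edges := edges ++ [((41 : Int), (36 : Int))]
    let edges := (PySem.List.pyRange 42 47 1).foldl (fun acc i => acc ++ [(i, i + 1)]) edges
    let edges := edges ++ [((47 : Int), (42 : Int))]
    let edges := (PySem.List.pyRange 48 59 1).foldl (fun acc i => acc ++ [(i, i + 1)]) edges
    let edges := edges ++ [((59 : Int), (48 : Int))]
    let edges := (PySem.List.pyRange 60 67 1).foldl (fun acc i => acc ++ [(i, i + 1)]) edges
    let edges := edges ++ [((67 : Int), (60 : Int))]
    let edges := edges ++ [((19 : Int), (37 : Int))]
    let edges := edges ++ [((24 : Int), (44 : Int))]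
    let edges := edges ++ [((30 : Int), (39 : Int))]
    let edges := edges ++ [((30 : Int), (42 : Int))]
    let edges := edges ++ [((33 : Int), (51 : Int))]
    let edges := edges ++ [((33 : Int), (57 : Int))]
    edges

-- ===== PORT B =====
-- closed-chain ends mapped to their chain start (Python dict)
def cfleClose : PySem.Dict Int Int := PySem.Dict.ofList [(35, 31), (41, 36), (47, 42), (59, 48), (67, 60)]
-- open-chain ends with no outgoing edge (Python set)
def cfleSkip : List Int := [16, 21, 26, 30]
def cfleExtras : List (Int × Int) :=
  [(19, 37), (24, 44), (30, 39), (30, 42), (33, 51), (33, 57)]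

def create_facial_landmark_edges_alt (num_landmarks : Int) : List (Int × Int) :=
  if num_landmarks < 68 then
    let edges := (PySem.List.pyRange 0 (num_landmarks - 1) 1).map (fun i => (i, i + 1))
    let step := max 1 (PySem.Int.floordiv num_landmarks 10)
    let edges := edges ++
      (PySem.List.pyRange 0 (num_landmarks - step) step).map (fun i => (i, i + step))
    if num_landmarks > 10 then
      edges ++ (PySem.List.pyRange 0 (PySem.Int.floordiv num_landmarks 2) 1).map
        (fun i => (i, num_landmarks - i - 1))
    else edges
  else
    ((PySem.List.pyRange 0 68 1).foldl (fun acc i =>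
      match PySem.Dict.get? cfleClose i with
      | some s => acc ++ [(i, s)]
      | none => if cfleSkip.contains i then acc else acc ++ [(i, i + 1)]) [])
    ++ cfleExtras

-- ===== PRECONDITION & SPEC =====
def Spec_create_facial_landmark_edges (num_landmarks : Int) (out : List (Int × Int)) : Prop := out = create_facial_landmark_edges_alt num_landmarks
instance (num_landmarks : Int) (out : List (Int × Int)) : Decidable (Spec_create_facial_landmark_edges num_landmarks out) := by unfold Spec_create_facial_landmark_edges; infer_instance

-- ===== CLAIM (what is proved, stated in full; the proofs are below) =====
def Claim_equal_create_facial_landmark_edges : Prop := ∀ (num_landmarks : Int), Dom_create_facial_landmark_edges num_landmarks → Spec_create_facial_landmark_edges num_landmarks (create_facial_landmark_edges num_landmarks)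

-- ===== LEMMAS AND PROOFS =====

-- ===== VERDICT (by name: the statement is the Claim_ definition above) =====
set_option maxRecDepth 8000 in
set_option maxHeartbeats 2000000 in
theorem create_facial_landmark_edges_spec : Claim_equal_create_facial_landmark_edges := by
  intro n _
  unfold Spec_create_facial_landmark_edges create_facial_landmark_edges create_facial_landmark_edges_alt
  by_cases h : n < 68
  · simp only [if_pos h, PySem.List.foldl_append_singleton_eq_map, List.nil_append]
  · simp only [if_neg h]
    decide
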